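-- pv_equiv track=rewrite | github.com/untergeek/es-fieldusage | src/es_fieldusage/helpers/utils.py | sum_dict_values
-- ===== SOURCE A (Python) =====
-- import typing as t
-- from collections import defaultdict
-- from itertools import chain
-- from operator import getitem, itemgetter
--
-- def sort_by_name(data: t.Dict[str, t.Any]) -> t.Dict[str, t.Any]:
--     """Sort dictionary by key alphabetically"""
--     return dict(sorted(data.items(), key=itemgetter(0)))
--
-- def sum_dict_values(data: t.Dict[str, t.Dict[str, t.Any]]) -> t.Dict[str, int]:
--     """Sum the values of data dict(s) into a new defaultdict"""
--     # Sets up result to have every dictionary key be an integer by default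
--     result = defaultdict(int)
--     dlist = []
--     for _, value in data.items():
--         dlist.append(value)
--     for key, value in chain.from_iterable(d.items() for d in dlist):
--         result[key] += int(value)
--     return sort_by_name(dict(result))
-- ===== SOURCE B (Python) =====
-- from itertools import groupby
-- from operator import itemgetter
--
-- def sum_dict_values(data):
--     """Sum the values of data dict(s) into a new dict, sorted by key."""
--     pairs = [(key, int(value)) for inner in data.values() for key, value in inner.items()]
--     pairs.sort(key=itemgetter(0))
--     return {key: sum(v for _, v in group)
--             for key, group in groupby(pairs, key=itemgetter(0))}
-- ===== Notes on version B (the rewrite author's own statement) =====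
-- stated objective: alternative
-- what changed: Replaced the defaultdict hash-aggregation followed by a separate sort of the result with a flatten -> sort -> itertools.groupby single-scan aggregation that emits the ascending key order directly.
import Mathlib
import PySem

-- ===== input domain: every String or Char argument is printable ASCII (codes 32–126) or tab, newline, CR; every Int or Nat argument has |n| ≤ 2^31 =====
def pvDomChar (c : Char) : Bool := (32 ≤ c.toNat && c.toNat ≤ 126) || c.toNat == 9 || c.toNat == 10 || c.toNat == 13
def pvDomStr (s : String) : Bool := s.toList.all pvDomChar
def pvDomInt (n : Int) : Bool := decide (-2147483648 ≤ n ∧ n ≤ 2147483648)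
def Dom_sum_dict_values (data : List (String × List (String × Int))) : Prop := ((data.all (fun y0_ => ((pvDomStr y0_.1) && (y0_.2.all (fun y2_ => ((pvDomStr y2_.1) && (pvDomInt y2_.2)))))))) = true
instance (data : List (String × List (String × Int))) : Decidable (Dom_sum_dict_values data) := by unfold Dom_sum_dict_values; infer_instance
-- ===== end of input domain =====

-- B aggregates by flatten → sort → groupby scan instead of A's defaultdict aggregation followed by a sort of the result; same return value, alternative decomposition.

-- ===== PORT A =====
def sum_dict_values (data : List (String × List (String × Int))) : List (String × Int) :=
  let dlist : List (List (String × Int)) :=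
    data.foldl (fun acc kv => acc ++ [kv.2]) []
  let result : PySem.Dict String Int :=
    (dlist.flatMap (fun d => d)).foldl
      (fun r kv => r.modify kv.1 0 (· + kv.2)) PySem.Dict.empty
  PySem.List.sorted result.items (fun p => p.1) false

-- ===== PORT B =====
-- itertools.groupby over a key-sorted pair list: one group per run of equal keys, summing its values
def pvGroupSum : List (String × Int) → List (String × Int)
  | [] => []
  | (k, v) :: rest =>
      (k, v + ((rest.takeWhile (fun p => p.1 == k)).map (·.2)).sum) ::
        pvGroupSum (rest.dropWhile (fun p => p.1 == k))
termination_by l => l.length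
decreasing_by
  simp only [List.length_cons]
  exact Nat.lt_succ_of_le (List.length_dropWhile_le _ _)

def sum_dict_values_alt (data : List (String × List (String × Int))) : List (String × Int) :=
  let pairs : List (String × Int) := data.flatMap (fun kv => kv.2)
  pvGroupSum (PySem.List.sorted pairs (fun p => p.1) false)

-- ===== PRECONDITION & SPEC =====
def Spec_sum_dict_values (data : List (String × List (String × Int))) (out : List (String × Int)) : Prop := out = sum_dict_values_alt data
instance (data : List (String × List (String × Int))) (out : List (String × Int)) : Decidable (Spec_sum_dict_values data out) := by unfold Spec_sum_dict_values; infer_instance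

-- ===== CLAIM (what is proved, stated in full; the proofs are below) =====
def Claim_equal_sum_dict_values : Prop := ∀ (data : List (String × List (String × Int))), Dom_sum_dict_values data → Spec_sum_dict_values data (sum_dict_values data)

-- ===== LEMMAS AND PROOFS =====

-- total value carried by key k in a pair list
def pvSumv (l : List (String × Int)) (k : String) : Int :=
  ((l.filter (fun p => p.1 == k)).map (·.2)).sum

lemma pv_getD_fold (l : List (String × Int)) (d : PySem.Dict String Int) (k : String) :
    (l.foldl (fun r kv => r.modify kv.1 0 (· + kv.2)) d).getD k 0
      = d.getD k 0 + pvSumv l k := by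
  induction l generalizing d with
  | nil => simp [pvSumv]
  | cons x l ih =>
      simp only [List.foldl_cons]
      rw [ih, PySem.Dict.getD_modify]
      simp only [pvSumv, List.filter_cons]
      by_cases h : x.1 = k
      · simp [h]; ring
      · have hb : (x.1 == k) = false := by simpa using h
        simp [hb, Ne.symm h]

lemma pv_sumv_perm (l l' : List (String × Int)) (h : l.Perm l') (k : String) :
    pvSumv l k = pvSumv l' k :=
  ((h.filter _).map _).sum_eq

lemma pv_lb_dropWhile (k : String) (l : List (String × Int))
    (hpw : l.Pairwise (fun a b => a.1 ≤ b.1)) (hlb : ∀ p ∈ l, k ≤ p.1) :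
    ∀ p ∈ l.dropWhile (fun p => p.1 == k), k < p.1 := by
  induction l with
  | nil => simp
  | cons q r ih =>
      rw [List.dropWhile_cons]
      rcases List.pairwise_cons.mp hpw with ⟨hq, hr⟩
      split_ifs with hqk
      · have hqe : q.1 = k := by simpa using hqk
        exact ih hr (fun p hp => hqe ▸ hq p hp)
      · intro p hp
        have hkq : k < q.1 :=
          lt_of_le_of_ne (hlb q (List.mem_cons_self)) (Ne.symm (by simpa using hqk))
        rcases List.mem_cons.mp hp with rfl | hp
        · exact hkq
        · exact lt_of_lt_of_le hkq (hq p hp)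

lemma pv_sumv_head_eq (k : String) (v : Int) (rest : List (String × Int))
    (hpw : ((k, v) :: rest).Pairwise (fun a b => a.1 ≤ b.1)) :
    pvSumv ((k, v) :: rest) k
      = v + ((rest.takeWhile (fun p => p.1 == k)).map (·.2)).sum := by
  rcases List.pairwise_cons.mp hpw with ⟨hq, hr⟩
  have hdr : ∀ p ∈ rest.dropWhile (fun p => p.1 == k), k < p.1 :=
    pv_lb_dropWhile k rest hr (fun p hp => hq p hp)
  have hsplit := List.takeWhile_append_dropWhile (p := fun p : String × Int => p.1 == k) (l := rest)
  have hft : (rest.takeWhile (fun p => p.1 == k)).filter (fun p => p.1 == k)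
      = rest.takeWhile (fun p => p.1 == k) :=
    List.filter_eq_self.mpr (fun p hp => by simpa using List.mem_takeWhile_imp hp)
  have hfd : (rest.dropWhile (fun p => p.1 == k)).filter (fun p => p.1 == k) = [] :=
    List.filter_eq_nil_iff.mpr (fun p hp => by
      simp only [beq_iff_eq]
      exact ne_of_gt (hdr p hp))
  calc pvSumv ((k, v) :: rest) k
      = v + pvSumv rest k := by
        simp [pvSumv, List.map_cons, List.sum_cons]
    _ = v + ((rest.takeWhile (fun p => p.1 == k)).map (·.2)).sum := by
        rw [pvSumv, ← hsplit, List.filter_append, hft, hfd]; simp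

lemma pv_sumv_tail_eq (k k' : String) (v : Int) (rest : List (String × Int))
    (hne : k' ≠ k) :
    pvSumv ((k, v) :: rest) k' = pvSumv (rest.dropWhile (fun p => p.1 == k)) k' := by
  have hsplit := List.takeWhile_append_dropWhile (p := fun p : String × Int => p.1 == k) (l := rest)
  have hft : (rest.takeWhile (fun p => p.1 == k)).filter (fun p => p.1 == k') = [] :=
    List.filter_eq_nil_iff.mpr (fun p hp => by
      have : p.1 = k := by simpa using List.mem_takeWhile_imp hp
      simp [this, Ne.symm hne])
  have h1 : pvSumv ((k, v) :: rest) k' = pvSumv rest k' := by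
    simp [pvSumv, Ne.symm hne]
  rw [h1, pvSumv, ← hsplit, List.filter_append, hft, pvSumv]
  simp

lemma pvGroupSum_mem (l : List (String × Int)) :
    l.Pairwise (fun a b => a.1 ≤ b.1) →
    ∀ p : String × Int, p ∈ pvGroupSum l ↔ p.1 ∈ l.map (·.1) ∧ p.2 = pvSumv l p.1 := by
  induction l using pvGroupSum.induct with
  | case1 => simp [pvGroupSum, pvSumv]
  | case2 k v rest ih =>
      intro hpw p
      rcases List.pairwise_cons.mp hpw with ⟨hq, hr⟩
      have hdrpw : (rest.dropWhile (fun p => p.1 == k)).Pairwise (fun a b => a.1 ≤ b.1) :=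
        hr.sublist (List.dropWhile_sublist _)
      have hdr : ∀ p ∈ rest.dropWhile (fun p => p.1 == k), k < p.1 :=
        pv_lb_dropWhile k rest hr (fun p hp => hq p hp)
      have ih' := ih hdrpw
      rw [pvGroupSum]
      by_cases hk : p.1 = k
      · constructor
        · intro hp
          rcases List.mem_cons.mp hp with rfl | hp
          · refine ⟨by simp, ?_⟩
            simpa using (pv_sumv_head_eq k v rest hpw).symm
          · exfalso
            rcases (ih' p).mp hp with ⟨hmem, _⟩
            rcases List.mem_map.mp hmem with ⟨q, hqmem, hq1⟩
            exact absurd (hq1 ▸ hdr q hqmem) (by simp [hk])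
        · rintro ⟨_, hval⟩
          have : p.2 = v + ((rest.takeWhile (fun p => p.1 == k)).map (·.2)).sum := by
            rw [hval, hk, pv_sumv_head_eq k v rest hpw]
          exact List.mem_cons.mpr (Or.inl (Prod.ext hk this))
      · have hhd : p ≠ (k, v + ((rest.takeWhile (fun p => p.1 == k)).map (·.2)).sum) := by
          intro h; exact hk (by rw [h])
        have hkeys : p.1 ∈ ((k, v) :: rest).map (·.1)
            ↔ p.1 ∈ (rest.dropWhile (fun p => p.1 == k)).map (·.1) := by
          have hsplit := List.takeWhile_append_dropWhile (p := fun p : String × Int => p.1 == k) (l := rest)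
          constructor
          · intro h
            rw [List.map_cons, List.mem_cons] at h
            rcases h with h1 | h1
            · exact absurd h1 hk
            · rcases List.mem_map.mp h1 with ⟨q, hqmem, hq1⟩
              rw [← hsplit, List.mem_append] at hqmem
              rcases hqmem with h2 | h2
              · exact absurd (by simpa [hq1] using List.mem_takeWhile_imp h2) hk
              · exact List.mem_map.mpr ⟨q, h2, hq1⟩
          · intro h
            rcases List.mem_map.mp h with ⟨q, hqmem, hq1⟩
            have : q ∈ rest := (List.dropWhile_sublist _).subset hqmem
            simp only [List.map_cons, List.mem_cons]
            exact Or.inr (List.mem_map.mpr ⟨q, this, hq1⟩)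
        rw [List.mem_cons]
        simp only [hhd, false_or]
        rw [ih' p, hkeys, pv_sumv_tail_eq k p.1 v rest hk]

lemma pvGroupSum_pairwise (l : List (String × Int)) :
    l.Pairwise (fun a b => a.1 ≤ b.1) →
    (pvGroupSum l).Pairwise (fun a b => a.1 < b.1) := by
  induction l using pvGroupSum.induct with
  | case1 => simp [pvGroupSum]
  | case2 k v rest ih =>
      intro hpw
      rcases List.pairwise_cons.mp hpw with ⟨hq, hr⟩
      have hdrpw : (rest.dropWhile (fun p => p.1 == k)).Pairwise (fun a b => a.1 ≤ b.1) :=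
        hr.sublist (List.dropWhile_sublist _)
      have hdr : ∀ p ∈ rest.dropWhile (fun p => p.1 == k), k < p.1 :=
        pv_lb_dropWhile k rest hr (fun p hp => hq p hp)
      rw [pvGroupSum]
      refine List.pairwise_cons.mpr ⟨?_, ih hdrpw⟩
      intro q hqmem
      rcases (pvGroupSum_mem _ hdrpw q).mp hqmem with ⟨hmem, _⟩
      rcases List.mem_map.mp hmem with ⟨x, hxmem, hx1⟩
      exact hx1 ▸ hdr x hxmem

lemma pv_core (ps : List (String × Int)) :
    PySem.List.sorted
        (ps.foldl (fun r kv => r.modify kv.1 0 (· + kv.2)) PySem.Dict.empty).items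
        (fun p => p.1) false
      = pvGroupSum (PySem.List.sorted ps (fun p => p.1) false) := by
  set D : PySem.Dict String Int :=
    ps.foldl (fun r kv => r.modify kv.1 0 (· + kv.2)) PySem.Dict.empty with hD
  set s : List (String × Int) := PySem.List.sorted ps (fun p => p.1) false with hs
  have hsperm : s.Perm ps := PySem.List.sorted_perm ps (fun p => p.1) false
  have hsp : s.Pairwise (fun a b => a.1 ≤ b.1) := PySem.List.sorted_pairwise ps (fun p => p.1)
  have hknd : D.keys.Nodup := by
    rw [hD]
    exact PySem.Dict.nodup_keys_foldl_modify_key ps (fun kv => kv.1) 0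
      (fun d kv => (· + kv.2)) PySem.Dict.empty PySem.Dict.nodup_keys_empty
  have hkeysmem : ∀ k : String, k ∈ D.keys ↔ k ∈ ps.map (·.1) := by
    intro k
    rw [hD, PySem.Dict.keys_foldl_modify_key ps (fun kv => kv.1) 0
      (fun d kv => (· + kv.2)) PySem.Dict.empty]
    simp [pysem]
  have hget : ∀ k : String, D.getD k 0 = pvSumv ps k := by
    intro k
    rw [hD, pv_getD_fold]
    simp [pvSumv]
  have hnd1 : (pvGroupSum s).Nodup :=
    (pvGroupSum_pairwise s hsp).imp (fun h => by intro he; rw [he] at h; exact lt_irrefl _ h)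
  have hnd2 : D.items.Nodup := List.Nodup.of_map (fun p : String × Int => p.1) (by exact hknd)
  apply PySem.List.sorted_eq_of_perm_of_pairwise_lt
  · rw [List.perm_ext_iff_of_nodup hnd1 hnd2]
    intro p
    rw [pvGroupSum_mem s hsp p]
    have hmemiff : p.1 ∈ s.map (·.1) ↔ p.1 ∈ ps.map (·.1) := (hsperm.map _).mem_iff
    have hsv : pvSumv s p.1 = pvSumv ps p.1 := pv_sumv_perm s ps hsperm p.1
    rw [hmemiff, hsv]
    constructor
    · rintro ⟨hmem, hval⟩
      have hmk : p.1 ∈ D.keys := (hkeysmem p.1).mpr hmem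
      rcases hcase : D.get? p.1 with _ | w
      · exact absurd ((PySem.Dict.get?_eq_none_iff_not_mem_keys D p.1).mp hcase) (by simp [hmk])
      · have hw : w = p.2 := by
          have := PySem.Dict.getD_eq_get?_getD (d := D) (k := p.1) (d0 := 0)
          rw [hget p.1, hcase] at this
          simp at this
          omega
        rw [hw] at hcase
        exact (PySem.Dict.get?_eq_some_iff_mem_items D p.1 p.2 hknd).mp hcase
    · intro hp
      have hget? : D.get? p.1 = some p.2 :=
        (PySem.Dict.get?_eq_some_iff_mem_items D p.1 p.2 hknd).mpr hp
      have hmk : p.1 ∈ D.keys := by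
        by_contra h
        rw [← PySem.Dict.get?_eq_none_iff_not_mem_keys D p.1] at h
        rw [h] at hget?; simp at hget?
      refine ⟨(hkeysmem p.1).mp hmk, ?_⟩
      have := PySem.Dict.getD_eq_get?_getD (d := D) (k := p.1) (d0 := 0)
      rw [hget p.1, hget?] at this
      simpa using this.symm
  · exact pvGroupSum_pairwise s hsp

theorem pv_main (data : List (String × List (String × Int))) :
    sum_dict_values data = sum_dict_values_alt data := by
  have hflat : ((data.foldl (fun acc kv => acc ++ [kv.2]) []).flatMap (fun d => d))
      = data.flatMap (fun kv => kv.2) := by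
    rw [PySem.List.foldl_append_singleton_eq_map]
    simp [List.flatMap_map]
  unfold sum_dict_values sum_dict_values_alt
  show PySem.List.sorted
      ((((data.foldl (fun acc kv => acc ++ [kv.2]) []).flatMap (fun d => d)).foldl
        (fun r kv => r.modify kv.1 0 (· + kv.2)) PySem.Dict.empty).items)
      (fun p => p.1) false
    = pvGroupSum (PySem.List.sorted (data.flatMap (fun kv => kv.2)) (fun p => p.1) false)
  rw [hflat]
  exact pv_core (data.flatMap (fun kv => kv.2))

-- ===== VERDICT (by name: the statement is the Claim_ definition above) =====
theorem sum_dict_values_spec : Claim_equal_sum_dict_values := by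
  intro data _
  unfold Spec_sum_dict_values
  exact pv_main data
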